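-- pv_equiv track=rewrite | github.com/taako2/the-fuck-pile | club_functions.py | get_clubs_of_friends
-- ===== SOURCE A (Python) =====
-- def get_clubs_of_friends(person_to_friends: dict[str, list[str]],
--                           person_to_clubs: dict[str, list[str]],
--                           person: str) -> list[str]:
--     """Return a sorted list of the clubs that at least one of the friends
--     of person belongs to, excluding the clubs person belongs to. If person
--     has no friends, return an empty list.
--
--     >>> P2F = {'Danny R Tanner': ['Jesse Katsopolis', 'DJ Tanner-Fuller', 'Joey Gladstone'], \
--     'Jesse Katsopolis': ['Danny R Tanner', 'Joey Gladstone', 'Rebecca Donaldson-Katsopolis'], \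
--     'Joey Gladstone': ['Danny R Tanner', 'Jesse Katsopolis'], \
--     'DJ Tanner-Fuller': ['Danny R Tanner'], \
--     'Rebecca Donaldson-Katsopolis': ['Jesse Katsopolis', 'Kimmy Gibbler'], \
--     'Kimmy Gibbler': ['Rebecca Donaldson-Katsopolis', 'Stephanie J Tanner'], \
--     'Stephanie J Tanner': ['Kimmy Gibbler', 'Michelle Tanner'], \
--     'Michelle Tanner': ['Stephanie J Tanner'], \
--     'Steve Hale': []}
--     >>> P2C = {'Danny R Tanner': ['Parent Council'], \
--     'Jesse Katsopolis': ['Parent Council', 'Rock N Rollers'], \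
--     'Joey Gladstone': ['Comics R Us', 'Parent Council'], \
--     'DJ Tanner-Fuller': [], \
--     'Rebecca Donaldson-Katsopolis': ['Rock N Rollers', 'Smash Club'], \
--     'Kimmy Gibbler': ['Rock N Rollers', 'Smash Club'], \
--     'Stephanie J Tanner': [], \
--     'Michelle Tanner': ['Comet Club'], \
--     'Steve Hale': []}
--     >>> get_clubs_of_friends(P2F, P2C, 'Danny R Tanner')
--     ['Comics R Us', 'Rock N Rollers']
--     """
--     clubs = set()
--     friends = person_to_friends.get(person, [])
--     for friend in friends:
--         clubs.update(person_to_clubs.get(friend, []))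
--     clubs.difference_update(person_to_clubs.get(person, []))
--     return sorted(list(clubs))
-- ===== SOURCE B (Python) =====
-- def get_clubs_of_friends(person_to_friends: dict[str, list[str]],
--                           person_to_clubs: dict[str, list[str]],
--                           person: str) -> list[str]:
--     flat = []
--     for friend in person_to_friends.get(person, []):
--         flat.extend(person_to_clubs.get(friend, []))
--     own = set(person_to_clubs.get(person, []))
--     flat.sort()
--     result = []
--     for club in flat:
--         if (not result or result[-1] != club) and club not in own:
--             result.append(club)
--     return result
-- ===== Notes on version B (the rewrite author's own statement) =====
-- stated objective: alternative
-- what changed: A accumulates friends' clubs in a hash set, removes the person's own clubs by set difference and sorts the result; B builds the flat duplicate-carrying list of friends' clubs, sorts it, and produces the output in one scan that skips adjacent duplicates and clubs in a precomputed own-clubs set.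
import Mathlib
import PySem

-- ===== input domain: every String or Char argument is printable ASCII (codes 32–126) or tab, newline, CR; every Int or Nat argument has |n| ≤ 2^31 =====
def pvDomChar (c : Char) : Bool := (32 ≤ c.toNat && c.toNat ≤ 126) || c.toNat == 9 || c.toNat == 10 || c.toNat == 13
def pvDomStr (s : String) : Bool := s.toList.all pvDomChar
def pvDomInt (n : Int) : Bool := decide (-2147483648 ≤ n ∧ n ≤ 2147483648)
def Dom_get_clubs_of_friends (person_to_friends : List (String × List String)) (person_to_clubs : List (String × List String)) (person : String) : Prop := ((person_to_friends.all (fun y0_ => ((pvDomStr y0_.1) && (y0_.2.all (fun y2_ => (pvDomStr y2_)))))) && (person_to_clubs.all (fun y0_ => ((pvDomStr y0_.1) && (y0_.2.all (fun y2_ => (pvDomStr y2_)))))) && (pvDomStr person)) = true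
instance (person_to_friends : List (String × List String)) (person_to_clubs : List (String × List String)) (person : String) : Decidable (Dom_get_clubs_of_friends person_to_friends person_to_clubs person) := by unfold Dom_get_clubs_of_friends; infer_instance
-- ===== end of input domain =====

-- B replaces A's hash-set accumulation and set-difference by a sort of the flat
-- duplicate-carrying club list followed by one adjacent-duplicate-skipping scan
-- with an own-clubs exclusion set (objective: alternative; same result, same cost class).

-- ===== PORT A =====
def get_clubs_of_friends (person_to_friends : List (String × List String)) (person_to_clubs : List (String × List String)) (person : String) : List String :=
  -- clubs = set(); friends = person_to_friends.get(person, [])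
  let friends := (PySem.Dict.mk person_to_friends).getD person []
  -- for friend in friends: clubs.update(person_to_clubs.get(friend, []))
  let clubs : PySem.Set String :=
    friends.foldl (fun s friend => PySem.Set.update s ((PySem.Dict.mk person_to_clubs).getD friend [])) PySem.Set.empty
  -- clubs.difference_update(person_to_clubs.get(person, []))
  let clubs := PySem.Set.diff clubs ((PySem.Dict.mk person_to_clubs).getD person [])
  -- return sorted(list(clubs))  (sorted of a set: order-independent result)
  PySem.List.sorted clubs (fun x => x) false

-- ===== PORT B =====
def get_clubs_of_friends_alt (person_to_friends : List (String × List String)) (person_to_clubs : List (String × List String)) (person : String) : List String :=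
  -- flat = []; for friend in person_to_friends.get(person, []): flat.extend(person_to_clubs.get(friend, []))
  let flat := ((PySem.Dict.mk person_to_friends).getD person []).foldl
    (fun acc friend => acc ++ (PySem.Dict.mk person_to_clubs).getD friend []) []
  -- own = set(person_to_clubs.get(person, []))
  let own := PySem.Set.ofList ((PySem.Dict.mk person_to_clubs).getD person [])
  -- flat.sort()
  let srt := PySem.List.sorted flat (fun x => x) false
  -- result = []; for club in srt: if (not result or result[-1] != club) and club not in own: result.append(club)
  -- (result[-1] on the guarded-nonempty list is its last element: res.getLast? — exact)
  srt.foldl (fun res club =>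
    if (res = [] ∨ res.getLast? ≠ some club) ∧ club ∉ own then res ++ [club] else res) []

-- ===== PRECONDITION & SPEC =====
def Spec_get_clubs_of_friends (person_to_friends : List (String × List String)) (person_to_clubs : List (String × List String)) (person : String) (out : List String) : Prop := out = get_clubs_of_friends_alt person_to_friends person_to_clubs person
instance (person_to_friends : List (String × List String)) (person_to_clubs : List (String × List String)) (person : String) (out : List String) : Decidable (Spec_get_clubs_of_friends person_to_friends person_to_clubs person out) := by unfold Spec_get_clubs_of_friends; infer_instance

-- ===== CLAIM (what is proved, stated in full; the proofs are below) =====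
def Claim_equal_get_clubs_of_friends : Prop := ∀ (person_to_friends : List (String × List String)) (person_to_clubs : List (String × List String)) (person : String), Dom_get_clubs_of_friends person_to_friends person_to_clubs person → Spec_get_clubs_of_friends person_to_friends person_to_clubs person (get_clubs_of_friends person_to_friends person_to_clubs person)

-- ===== LEMMAS AND PROOFS =====

-- A's set-accumulation loop is Set.update of the empty set with the flattened club list.
theorem pvFoldlUpdate (c : String → List String) :
    ∀ (F : List String) (s : PySem.Set String),
      F.foldl (fun s f => PySem.Set.update s (c f)) s = PySem.Set.update s (F.flatMap c) := by
  intro F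
  induction F with
  | nil => intro s; simp [PySem.Set.update_nil]
  | cons f F ih =>
      intro s
      simp only [List.foldl_cons, List.flatMap_cons, PySem.Set.update_append]
      exact ih _

-- B's scan over a ≤-sorted list: strictly increasing output whose members are the
-- members of the input outside `own`, given that everything still to come is ≥ the
-- accumulator's members.
theorem pvScanSpec (own : PySem.Set String) :
    ∀ (s res : List String),
      s.Pairwise (· ≤ ·) → res.Pairwise (· < ·) → (∀ x ∈ s, ∀ y ∈ res, y ≤ x) →
      (List.Pairwise (· < ·)
        (s.foldl (fun res club =>
          if (res = [] ∨ res.getLast? ≠ some club) ∧ club ∉ own then res ++ [club] else res) res)) ∧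
      (∀ z, z ∈ (s.foldl (fun res club =>
          if (res = [] ∨ res.getLast? ≠ some club) ∧ club ∉ own then res ++ [club] else res) res)
        ↔ z ∈ res ∨ (z ∈ s ∧ z ∉ own)) := by
  intro s
  induction s with
  | nil => intro res _ hres _; exact ⟨hres, by simp⟩
  | cons a s ih =>
      intro res hs hres hle
      have hs' := hs.tail
      have hsa : ∀ x ∈ s, a ≤ x := fun x hx => List.rel_of_pairwise_cons hs hx
      simp only [List.foldl_cons]
      by_cases hcond : (res = [] ∨ res.getLast? ≠ some a) ∧ a ∉ own
      · rw [if_pos hcond]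
        -- the appended element is strictly above everything in res
        have hlt : ∀ y ∈ res, y < a := by
          intro y hy
          have hya : y ≤ a := hle a (by simp) y hy
          rcases lt_or_eq_of_le hya with h | h
          · exact h
          · -- y = a ∈ res, yet res is nonempty and res.getLast? ≠ some a: but the last
            -- element is res's maximum and everything in res is ≤ a, contradiction
            exfalso
            subst h
            have hne : res ≠ [] := by rintro rfl; simp at hy
            set m := res.getLast hne with hm
            have hml : res.getLast? = some m := List.getLast?_eq_some_getLast hne
            have hma : m ≤ y := hle y (by simp) m (List.getLast_mem hne)
            have ham : y ≤ m := by
              have hsplit : res.dropLast ++ [m] = res := List.dropLast_append_getLast hne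
              have hp : (res.dropLast ++ [m]).Pairwise (· < ·) := by rw [hsplit]; exact hres
              rcases List.mem_append.mp (hsplit ▸ hy) with hmem | hmem
              · exact le_of_lt ((List.pairwise_append.mp hp).2.2 y hmem m (by simp))
              · simp at hmem; exact le_of_eq hmem
            have : res.getLast? = some y := by rw [hml]; congr 1; exact le_antisymm hma ham
            rcases hcond.1 with h0 | h0
            · exact absurd h0 hne
            · exact absurd this h0
        have hres' : (res ++ [a]).Pairwise (· < ·) := by
          refine List.pairwise_append.mpr ⟨hres, List.pairwise_singleton _ _, ?_⟩
          intro y hy b hb; simp at hb; subst hb; exact hlt y hy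
        have hle' : ∀ x ∈ s, ∀ y ∈ res ++ [a], y ≤ x := by
          intro x hx y hy
          rcases List.mem_append.mp hy with h | h
          · exact hle x (by simp [hx]) y h
          · simp at h; subst h; exact hsa x hx
        obtain ⟨h1, h2⟩ := ih (res ++ [a]) hs' hres' hle'
        refine ⟨h1, ?_⟩
        intro z
        rw [h2 z]
        constructor
        · rintro (hz | hz)
          · rcases List.mem_append.mp hz with h | h
            · exact Or.inl h
            · simp at h; subst h; exact Or.inr ⟨by simp, hcond.2⟩
          · exact Or.inr ⟨by simp [hz.1], hz.2⟩
        · rintro (hz | ⟨hz, hzo⟩)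
          · exact Or.inl (List.mem_append.mpr (Or.inl hz))
          · rcases List.mem_cons.mp hz with h | h
            · subst h; exact Or.inl (by simp)
            · exact Or.inr ⟨h, hzo⟩
      · rw [if_neg hcond]
        -- skipped: either a ∈ own, or a is already the last element of res
        have hmem : a ∈ own ∨ a ∈ res := by
          by_cases ho : a ∈ own
          · exact Or.inl ho
          · right
            have hlast : res.getLast? = some a := by
              by_contra hk
              exact hcond ⟨Or.inr hk, ho⟩
            exact List.mem_of_getLast? hlast
        obtain ⟨h1, h2⟩ := ih res hs' hres (fun x hx y hy => hle x (by simp [hx]) y hy)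
        refine ⟨h1, ?_⟩
        intro z
        rw [h2 z]
        constructor
        · rintro (hz | hz)
          · exact Or.inl hz
          · exact Or.inr ⟨by simp [hz.1], hz.2⟩
        · rintro (hz | ⟨hz, hzo⟩)
          · exact Or.inl hz
          · rcases List.mem_cons.mp hz with h | h
            · subst h
              rcases hmem with h | h
              · exact absurd h hzo
              · exact Or.inl h
            · exact Or.inr ⟨h, hzo⟩

-- The whole pipeline, stated over an arbitrary friends list F, club lookup c and own-clubs list O.
theorem pvMain (F : List String) (c : String → List String) (O : List String) :
    PySem.List.sorted
        (PySem.Set.diff (F.foldl (fun s f => PySem.Set.update s (c f)) PySem.Set.empty) O)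
        (fun x => x) false
    = (PySem.List.sorted (F.foldl (fun acc f => acc ++ c f) []) (fun x => x) false).foldl
        (fun res club =>
          if (res = [] ∨ res.getLast? ≠ some club) ∧ club ∉ PySem.Set.ofList O then res ++ [club]
          else res) [] := by
  have hA : F.foldl (fun s f => PySem.Set.update s (c f)) PySem.Set.empty
      = PySem.Set.ofList (F.flatMap c) := by
    rw [pvFoldlUpdate c F PySem.Set.empty, PySem.Set.update_empty]
  have hflat : F.foldl (fun acc f => acc ++ c f) [] = F.flatMap c := by
    simpa using PySem.List.foldl_append_eq_flatMap c F []
  rw [hA, hflat]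
  set own := PySem.Set.ofList O with ho
  set flat := F.flatMap c with hfl
  set srt := PySem.List.sorted flat (fun x => x) false with hsrt
  have hsp : srt.Pairwise (· ≤ ·) := PySem.List.sorted_pairwise flat (fun x => x)
  obtain ⟨hpw, hmem⟩ := pvScanSpec own srt [] hsp List.Pairwise.nil (by simp)
  set R := srt.foldl (fun res club =>
      if (res = [] ∨ res.getLast? ≠ some club) ∧ club ∉ own then res ++ [club] else res) [] with hR
  have hperm : R.Perm (PySem.Set.diff (PySem.Set.ofList flat) O) := by
    rw [List.perm_ext_iff_of_nodup hpw.nodup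
      (PySem.Set.nodup_diff _ _ (PySem.Set.nodup_ofList flat))]
    intro z
    have hz1 := hmem z
    have hz2 : z ∈ srt ↔ z ∈ flat := PySem.List.mem_sorted flat (fun x => x) false z
    simp only [hz1, hz2, PySem.Set.mem_diff, PySem.Set.mem_ofList, ho, List.not_mem_nil,
      false_or]
  exact PySem.List.sorted_eq_of_perm_of_pairwise_lt _ R (fun x => x) hperm hpw

-- ===== VERDICT (by name: the statement is the Claim_ definition above) =====
theorem get_clubs_of_friends_spec : Claim_equal_get_clubs_of_friends := by
  intro p2f p2c person _
  exact pvMain ((PySem.Dict.mk p2f).getD person [])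
    (fun f => (PySem.Dict.mk p2c).getD f [])
    ((PySem.Dict.mk p2c).getD person [])
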